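-- pv_equiv track=rewrite | github.com/Arn0dian/TimeTable-Project-DC | initialization.py | closeChromosome
-- ===== SOURCE A (Python) =====
-- def closeChromosome(week):
--     cweek = []
--     slotting = []
--     for i in range(0,len(week),4):
--         slotting.append(week[i:i+4])
--     for i in range(0,len(slotting),6):
--         cweek.append(slotting[i:i+6])
--     return cweek
-- ===== SOURCE B (Python) =====
-- def closeChromosome(week):
--     # single nested pass: build each group of up to 6 slots directly from
--     # absolute indices into week, skipping the intermediate flat slot list
--     n = len(week)
--     cweek = []
--     for start in range(0, n, 24):
--         cweek.append([week[j:j+4] for j in range(start, min(start + 24, n), 4)])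
--     return cweek
-- ===== Notes on version B (the rewrite author's own statement) =====
-- stated objective: alternative
-- what changed: Replaces A's two sequential reshaping loops (flat slot list, then grouping that list) with a single nested pass that builds each group of up to 6 slots directly from absolute indices into week, never materialising the intermediate slot list.
import Mathlib
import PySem

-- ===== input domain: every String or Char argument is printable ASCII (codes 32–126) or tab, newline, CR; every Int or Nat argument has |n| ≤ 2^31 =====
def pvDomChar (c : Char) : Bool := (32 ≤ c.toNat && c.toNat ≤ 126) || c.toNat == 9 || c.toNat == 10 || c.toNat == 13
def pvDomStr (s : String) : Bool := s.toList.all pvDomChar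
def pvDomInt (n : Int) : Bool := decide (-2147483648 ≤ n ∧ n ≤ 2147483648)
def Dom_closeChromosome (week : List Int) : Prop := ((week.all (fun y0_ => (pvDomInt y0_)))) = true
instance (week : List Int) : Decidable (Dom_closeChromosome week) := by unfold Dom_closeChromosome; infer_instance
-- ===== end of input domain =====

-- B replaces A's two sequential reshaping loops with one nested pass over absolute
-- indices that builds each group of up to 6 slots directly (no intermediate slot list);
-- alternative decomposition, same O(n) cost.


-- ===== PORT A =====
def closeChromosome (week : List Int) : List (List (List Int)) :=
  -- cweek = []; slotting = []
  -- for i in range(0, len(week), 4): slotting.append(week[i:i+4])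
  let slotting : List (List Int) :=
    (PySem.List.pyRange 0 (week.length : Int) 4).foldl
      (fun acc i => acc ++ [PySem.List.slice week (some i) (some (i + 4))]) []
  -- for i in range(0, len(slotting), 6): cweek.append(slotting[i:i+6])
  (PySem.List.pyRange 0 (slotting.length : Int) 6).foldl
    (fun acc i => acc ++ [PySem.List.slice slotting (some i) (some (i + 6))]) []

-- ===== PORT B =====
def closeChromosome_alt (week : List Int) : List (List (List Int)) :=
  -- for start in range(0, n, 24): cweek.append([week[j:j+4] for j in range(start, min(start+24, n), 4)])
  (PySem.List.pyRange 0 (week.length : Int) 24).foldl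
    (fun acc start =>
      acc ++ [(PySem.List.pyRange start (min (start + 24) (week.length : Int)) 4).map
                (fun j => PySem.List.slice week (some j) (some (j + 4)))]) []

-- ===== PRECONDITION & SPEC =====
def Spec_closeChromosome (week : List Int) (out : List (List (List Int))) : Prop := out = closeChromosome_alt week
instance (week : List Int) (out : List (List (List Int))) : Decidable (Spec_closeChromosome week out) := by unfold Spec_closeChromosome; infer_instance

-- ===== CLAIM (what is proved, stated in full; the proofs are below) =====
def Claim_equal_closeChromosome : Prop := ∀ (week : List Int), Dom_closeChromosome week → Spec_closeChromosome week (closeChromosome week)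

-- ===== LEMMAS AND PROOFS =====

/-- The chunking both programs compute: split a list into consecutive pieces of size `c`
(last piece possibly shorter). -/
def chunks {α : Type} (c : Nat) : List α → List (List α)
  | [] => []
  | x :: t => (x :: t.take (c - 1)) :: chunks c (t.drop (c - 1))
termination_by xs => xs.length
decreasing_by simp

theorem chunks_nil {α : Type} (c : Nat) : chunks c ([] : List α) = [] := by rw [chunks]

theorem chunks_cons {α : Type} (c : Nat) (x : α) (t : List α) :
    chunks c (x :: t) = (x :: t.take (c - 1)) :: chunks c (t.drop (c - 1)) := by rw [chunks]

/-- Induction principle following `chunks`' recursion. -/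
theorem chunks_ind {α : Type} (c : Nat) (P : List α → Prop) (h0 : P [])
    (h1 : ∀ (x : α) (t : List α), P (t.drop (c - 1)) → P (x :: t)) (xs : List α) : P xs := by
  have key : ∀ (n : Nat) (xs : List α), xs.length ≤ n → P xs := by
    intro n
    induction n with
    | zero => intro xs h; cases xs with
        | nil => exact h0
        | cons x t => simp at h
    | succ n ih =>
        intro xs h
        cases xs with
        | nil => exact h0
        | cons x t => exact h1 x t (ih _ (by simp at h ⊢; omega))
  exact key xs.length xs le_rfl

theorem length_chunks {α : Type} (c : Nat) (hc : 0 < c) (xs : List α) :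
    (chunks c xs).length = (xs.length + c - 1) / c := by
  induction xs using chunks_ind (c := c) with
  | h0 => rw [chunks_nil]; simp [Nat.div_eq_of_lt (show c - 1 < c by omega)]
  | h1 x t ih =>
      rw [chunks_cons]
      simp only [List.length_cons, ih, List.length_drop]
      rcases Nat.le_total t.length (c - 1) with h | h
      · rw [show t.length - (c - 1) = 0 by omega, Nat.zero_add,
            show t.length + 1 + c - 1 = t.length + c by omega, Nat.add_div_right _ hc,
            Nat.div_eq_of_lt (show t.length < c by omega),
            Nat.div_eq_of_lt (show c - 1 < c by omega)]
      · rw [show t.length + 1 + c - 1 = (t.length - (c - 1) + c - 1) + c by omega,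
            Nat.add_div_right _ hc]

theorem take_chunks {α : Type} (c : Nat) (hc : 0 < c) (m : Nat) (xs : List α) :
    (chunks c xs).take m = chunks c (xs.take (c * m)) := by
  induction m generalizing xs with
  | zero => simp [chunks_nil]
  | succ m ih =>
      have hcm : c * (m + 1) = c * m + c := by ring
      cases xs with
      | nil => simp [chunks_nil]
      | cons x t =>
          have h1 : List.take (c - 1) (List.take (c * m + c - 1) t) = List.take (c - 1) t := by
            rw [List.take_take]; congr 1; omega
          have h2 : List.drop (c - 1) (List.take (c * m + c - 1) t)
              = List.take (c * m) (List.drop (c - 1) t) := by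
            rw [List.drop_take]; congr 1; omega
          rw [chunks_cons, List.take_succ_cons,
              show c * (m + 1) = c * m + c from by ring,
              show c * m + c = (c * m + c - 1) + 1 from by omega,
              List.take_succ_cons, chunks_cons, h1, h2, ih]

theorem drop_chunks {α : Type} (c : Nat) (hc : 0 < c) (m : Nat) (xs : List α) :
    (chunks c xs).drop m = chunks c (xs.drop (c * m)) := by
  induction m generalizing xs with
  | zero => simp
  | succ m ih =>
      have hcm : c * (m + 1) = c * m + c := by ring
      cases xs with
      | nil => simp [chunks_nil]
      | cons x t =>
          rw [chunks_cons, List.drop_succ_cons, ih, List.drop_drop,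
              show c * (m + 1) = c * m + c from by ring,
              show c * m + c = (c * m + (c - 1)) + 1 from by omega,
              List.drop_succ_cons]
          congr 2
          omega

/-- The normal form both ports reduce to: take `c`-windows at indices `c*j`. -/
theorem range_map_eq_chunks {α : Type} (c : Nat) (hc : 0 < c) (xs : List α) :
    (List.range ((xs.length + c - 1) / c)).map
        (fun j => (xs.drop (c * j)).take c) = chunks c xs := by
  induction xs using chunks_ind (c := c) with
  | h0 => rw [chunks_nil]; simp [Nat.div_eq_of_lt (show c - 1 < c by omega)]
  | h1 x t ih =>
      have hcnt : ((x :: t).length + c - 1) / c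
          = ((t.drop (c - 1)).length + c - 1) / c + 1 := by
        simp only [List.length_cons, List.length_drop]
        rcases Nat.le_total t.length (c - 1) with h | h
        · rw [show t.length - (c - 1) = 0 by omega, Nat.zero_add,
              show t.length + 1 + c - 1 = t.length + c by omega, Nat.add_div_right _ hc,
              Nat.div_eq_of_lt (show t.length < c by omega),
              Nat.div_eq_of_lt (show c - 1 < c by omega)]
        · rw [show t.length + 1 + c - 1 = (t.length - (c - 1) + c - 1) + c by omega,
              Nat.add_div_right _ hc]
      rw [hcnt, List.range_succ_eq_map]
      simp only [List.map_cons, List.map_map]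
      rw [chunks_cons]
      congr 1
      · simp only [Nat.mul_zero, List.drop_zero]
        rw [show c = (c - 1) + 1 by omega, List.take_succ_cons]
        simp
      · rw [← ih]
        apply List.map_congr_left
        intro j _
        simp only [Function.comp]
        rw [show c * (j + 1) = c * j + c from by ring,
            show c * j + c = (c * j + (c - 1)) + 1 from by omega,
            List.drop_succ_cons, List.drop_drop]
        congr 2
        omega

/-- Evaluate a positive-step `pyRange` of slices into the Nat normal form. -/
theorem pyRange_map_slice {α : Type} (xs : List α) (a c b : Nat) (hc : 0 < c) :
    (PySem.List.pyRange (a : Int) (b : Int) (c : Int)).map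
        (fun i => PySem.List.slice xs (some i) (some (i + (c : Int))))
      = (List.range ((b - a + c - 1) / c)).map
          (fun j => (xs.drop (a + c * j)).take c) := by
  rw [PySem.List.pyRange_of_pos _ _ (by exact_mod_cast hc), List.map_map]
  have hcount : (if (a : Int) < (b : Int) then (((b : Int) - a + c - 1) / c).toNat else 0)
      = (b - a + c - 1) / c := by
    split
    · have hab : a < b := by exact_mod_cast ‹(a : Int) < b›
      rw [show ((b : Int) - a + c - 1) = ((b - a + c - 1 : Nat) : Int) by omega]
      exact Nat.add_zero _
    · have hab : ¬ a < b := fun h => ‹¬ (a : Int) < b› (by exact_mod_cast h)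
      rw [show b - a = 0 by omega, Nat.zero_add, Nat.div_eq_of_lt (by omega)]
  rw [hcount]
  apply List.map_congr_left
  intro j _
  simp only [Function.comp]
  rw [show ((a : Int) + (c : Int) * (j : Int)) = ((a + c * j : Nat) : Int) by push_cast; ring,
      PySem.List.slice_natCast_add]

/-- A's slotting loop is chunking by 4. -/
theorem loop_slices_eq_chunks_4 (xs : List Int) :
    (PySem.List.pyRange 0 (xs.length : Int) 4).foldl
      (fun acc i => acc ++ [PySem.List.slice xs (some i) (some (i + 4))]) []
    = chunks 4 xs := by
  rw [PySem.List.foldl_append_singleton_eq_map, List.nil_append]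
  have h := pyRange_map_slice xs 0 4 xs.length (by norm_num)
  have h2 := range_map_eq_chunks 4 (by norm_num) xs
  norm_num at h h2
  rw [h, h2]

/-- A's regrouping loop is chunking by 6. -/
theorem loop_slices_eq_chunks_6 (xs : List (List Int)) :
    (PySem.List.pyRange 0 (xs.length : Int) 6).foldl
      (fun acc i => acc ++ [PySem.List.slice xs (some i) (some (i + 6))]) []
    = chunks 6 xs := by
  rw [PySem.List.foldl_append_singleton_eq_map, List.nil_append]
  have h := pyRange_map_slice xs 0 6 xs.length (by norm_num)
  have h2 := range_map_eq_chunks 6 (by norm_num) xs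
  norm_num at h h2
  rw [h, h2]

theorem closeChromosome_eq_chunks (week : List Int) :
    closeChromosome week = chunks 6 (chunks 4 week) := by
  unfold closeChromosome
  rw [loop_slices_eq_chunks_4, loop_slices_eq_chunks_6]

/-- B's inner comprehension builds exactly the `4`-chunks of the 24-window at `24*g`. -/
theorem inner_eq_chunks (xs : List Int) (g : Nat) :
    (PySem.List.pyRange ((0:Int) + 24 * (g : Int))
        (min ((0:Int) + 24 * (g : Int) + 24) (xs.length : Int)) 4).map
        (fun j => PySem.List.slice xs (some j) (some (j + 4)))
      = chunks 4 ((xs.drop (24 * g)).take 24) := by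
  have h := pyRange_map_slice xs (24 * g) 4 (min (24 * g + 24) xs.length) (by norm_num)
  have h2 := range_map_eq_chunks 4 (by norm_num) ((xs.drop (24 * g)).take 24)
  norm_num at h h2
  rw [show (0:Int) + 24 * (g : Int) = 24 * (g : Int) from by ring, h, ← h2,
      show (min (24 * g + 24) xs.length - 24 * g + 3) / 4
        = (min 24 (xs.length - 24 * g) + 3) / 4 from by omega]
  apply List.map_congr_left
  intro j hj
  simp only [List.mem_range] at hj
  rw [List.drop_take, List.take_take, List.drop_drop]
  congr 1
  omega

theorem closeChromosome_alt_eq_chunks (week : List Int) :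
    closeChromosome_alt week = chunks 6 (chunks 4 week) := by
  unfold closeChromosome_alt
  rw [PySem.List.foldl_append_singleton_eq_map, List.nil_append,
      PySem.List.pyRange_of_pos _ _ (by norm_num : (0:Int) < 24), List.map_map]
  have hRHS := range_map_eq_chunks 6 (by norm_num) (chunks 4 week)
  norm_num at hRHS
  rw [← hRHS, length_chunks 4 (by norm_num) week]
  have hcnt : (if (0:Int) < (week.length : Int)
        then (((week.length : Int) - 0 + 24 - 1) / 24).toNat else 0)
      = ((week.length + 4 - 1) / 4 + 5) / 6 := by
    split
    · omega
    · omega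
  rw [hcnt]
  apply List.map_congr_left
  intro g hg
  simp only [List.mem_range] at hg
  simp only [Function.comp]
  rw [inner_eq_chunks week g, drop_chunks 4 (by norm_num) (6 * g) week,
      take_chunks 4 (by norm_num) 6 (week.drop (4 * (6 * g))),
      show 4 * (6 * g) = 24 * g by ring, show (4 * 6 : Nat) = 24 from rfl]

-- ===== VERDICT (by name: the statement is the Claim_ definition above) =====
theorem closeChromosome_spec : Claim_equal_closeChromosome := by
  intro week _
  unfold Spec_closeChromosome
  rw [closeChromosome_eq_chunks, closeChromosome_alt_eq_chunks]
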